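-- pv_equiv track=rewrite | github.com/adampolak/first-fit | runs/results_numcolors/gen_384/main.py | _apply_round
-- ===== SOURCE A (Python) =====
-- def _span_delta(T):
--   lo = min(l for l, _ in T)
--   hi = max(r for _, r in T)
--   delta = hi - lo
--   if delta <= 0:
--     delta = 1
--   return lo, hi, delta
--
-- def _append_connectors(S, delta, starts):
--   # Classic four connectors providing cross-links between translated blocks
--   s0, s1, s2, s3 = starts
--   S.append(((s0 - 1) * delta, (s1 - 1) * delta))  # left cap
--   S.append(((s2 + 2) * delta, (s3 + 2) * delta))  # right cap
--   S.append(((s0 + 2) * delta, (s2 - 1) * delta))  # cross 1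
--   S.append(((s1 + 2) * delta, (s3 - 1) * delta))  # cross 2
--
-- def _apply_round(current_T, starts, do_interleave=False, reverse_order=False):
--   lo, hi, delta = _span_delta(current_T)
--
--   # Build four translated blocks; deterministic, compact construction
--   blocks = []
--   for s in starts:
--     base = s * delta - lo
--     block = [(l + base, r + base) for (l, r) in current_T]
--     blocks.append(block)
--
--   # Assemble S with optional interleaving
--   S = []
--   if do_interleave:
--     maxlen = max(len(b) for b in blocks)
--     order = [0, 1, 2, 3]
--     if reverse_order:
--       order = list(reversed(order))
--     for i in range(maxlen):
--       for idx in order: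
--         blk = blocks[idx]
--         if i < len(blk):
--           S.append(blk[i])
--   else:
--     if reverse_order:
--       blocks = list(reversed(blocks))
--     for blk in blocks:
--       S.extend(blk)
--
--   _append_connectors(S, delta, starts)
--   return S
-- ===== SOURCE B (Python) =====
-- def _apply_round(current_T, starts, do_interleave=False, reverse_order=False):
--   lo = min(l for l, _ in current_T)
--   hi = max(r for _, r in current_T)
--   delta = hi - lo
--   if delta <= 0:
--     delta = 1
--   n = len(current_T)
--   st = list(starts)
--
--   # Single flat pass: each output position k of the 4*n body is decoded by
--   # index arithmetic (divmod) into (block j, interval i); no nested loops,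
--   # no intermediate block lists.
--   def elem(k):
--     if do_interleave:
--       i, j = divmod(k, 4)
--     else:
--       j, i = divmod(k, n)
--     if reverse_order:
--       j = 3 - j
--     l, r = current_T[i]
--     base = st[j] * delta - lo
--     return (l + base, r + base)
--
--   S = [elem(k) for k in range(4 * n)]
--   s0, s1, s2, s3 = starts
--   S.append(((s0 - 1) * delta, (s1 - 1) * delta))
--   S.append(((s2 + 2) * delta, (s3 + 2) * delta))
--   S.append(((s0 + 2) * delta, (s2 - 1) * delta))
--   S.append(((s1 + 2) * delta, (s3 - 1) * delta))
--   return S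
-- ===== Notes on version B (the rewrite author's own statement) =====
-- stated objective: alternative
-- what changed: B replaces A's staged construction (build four block lists, then concatenate or index-interleave them) by a single flat pass over range(4*n) that decodes each output position with divmod index arithmetic into (block, interval) and computes that element directly.
import Mathlib
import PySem

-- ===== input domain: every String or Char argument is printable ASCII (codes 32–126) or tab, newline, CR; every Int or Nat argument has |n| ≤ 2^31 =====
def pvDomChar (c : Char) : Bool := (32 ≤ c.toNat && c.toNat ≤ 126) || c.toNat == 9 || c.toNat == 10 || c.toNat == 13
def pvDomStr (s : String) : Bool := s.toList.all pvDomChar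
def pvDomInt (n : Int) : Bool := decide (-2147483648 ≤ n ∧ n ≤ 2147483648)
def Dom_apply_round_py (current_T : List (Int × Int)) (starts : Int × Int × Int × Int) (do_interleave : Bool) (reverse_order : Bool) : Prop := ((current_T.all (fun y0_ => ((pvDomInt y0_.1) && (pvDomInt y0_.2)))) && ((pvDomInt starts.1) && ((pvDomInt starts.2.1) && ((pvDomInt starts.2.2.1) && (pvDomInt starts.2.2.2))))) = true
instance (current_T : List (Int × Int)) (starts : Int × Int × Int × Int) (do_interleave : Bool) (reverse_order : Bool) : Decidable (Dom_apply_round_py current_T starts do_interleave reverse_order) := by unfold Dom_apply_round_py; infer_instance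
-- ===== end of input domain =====

-- B replaces A's staged block-list construction by a single flat pass over range(4*n)
-- that decodes each position with divmod into (block, interval) (objective: alternative).


-- ===== PORT A =====
-- _span_delta: min/max over the interval endpoints; none = ValueError on empty current_T
def pvSpanDelta (T : List (Int × Int)) : Option (Int × Int × Int) :=
  match PySem.List.min? (T.map (fun p => p.1)) (fun x => x),
        PySem.List.max? (T.map (fun p => p.2)) (fun x => x) with
  | some lo, some hi =>
      let delta := hi - lo
      let delta := if delta ≤ 0 then 1 else delta
      some (lo, hi, delta)
  | _, _ => none

-- _append_connectors
def pvAppendConnectors (S : List (Int × Int)) (delta : Int) (starts : Int × Int × Int × Int) : List (Int × Int) :=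
  ((((S ++ [((starts.1 - 1) * delta, (starts.2.1 - 1) * delta)])
      ++ [((starts.2.2.1 + 2) * delta, (starts.2.2.2 + 2) * delta)])
      ++ [((starts.1 + 2) * delta, (starts.2.2.1 - 1) * delta)])
      ++ [((starts.2.1 + 2) * delta, (starts.2.2.2 - 1) * delta)])

def apply_round_py (current_T : List (Int × Int)) (starts : Int × Int × Int × Int) (do_interleave : Bool) (reverse_order : Bool) : List (Int × Int) :=
  match pvSpanDelta current_T with
  | none => []   -- Python raises ValueError here (empty current_T); excluded by Pre_
  | some (lo, _hi, delta) =>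
    let blocks : List (List (Int × Int)) :=
      [starts.1, starts.2.1, starts.2.2.1, starts.2.2.2].foldl
        (fun bs s =>
          let base := s * delta - lo
          bs ++ [current_T.map (fun p => (p.1 + base, p.2 + base))]) []
    let S : List (Int × Int) :=
      if do_interleave then
        match PySem.List.max? (blocks.map (fun b => PySem.List.len b)) (fun x => x) with
        | none => []   -- unreachable: blocks always has four elements
        | some maxlen =>
          let order : List Int := if reverse_order then [3, 2, 1, 0] else [0, 1, 2, 3]
          (PySem.List.pyRange 0 maxlen 1).foldl (fun S i =>
            order.foldl (fun S idx =>
              match PySem.List.pyGet? blocks idx with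
              | none => S   -- unreachable: idx ∈ [0,3] and blocks has four elements
              | some blk =>
                if i < PySem.List.len blk then
                  match PySem.List.pyGet? blk i with
                  | none => S   -- unreachable: 0 ≤ i < len blk
                  | some x => S ++ [x]
                else S) S) []
      else
        let blocks := if reverse_order then blocks.reverse else blocks
        blocks.foldl (fun S blk => S ++ blk) []
    pvAppendConnectors S delta starts

-- ===== PORT B =====
def apply_round_py_alt (current_T : List (Int × Int)) (starts : Int × Int × Int × Int) (do_interleave : Bool) (reverse_order : Bool) : List (Int × Int) :=
  match PySem.List.min? (current_T.map (fun p => p.1)) (fun x => x),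
        PySem.List.max? (current_T.map (fun p => p.2)) (fun x => x) with
  | some lo, some hi =>
    let d := hi - lo
    let delta := if d ≤ 0 then 1 else d
    let n := PySem.List.len current_T
    let st : List Int := [starts.1, starts.2.1, starts.2.2.1, starts.2.2.2]
    -- elem(k): decode flat position k into (interval i, block j) by divmod
    let elem : Int → Int × Int := fun k =>
      let ij : Int × Int :=
        if do_interleave then
          match PySem.Int.divmod? k 4 with
          | some (i, j) => (i, j)
          | none => (0, 0)   -- unreachable: divisor is 4
        else
          match PySem.Int.divmod? k n with
          | some (j, i) => (i, j)
          | none => (0, 0)   -- unreachable: n > 0 (nonempty current_T)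
      let j := if reverse_order then 3 - ij.2 else ij.2
      let p := PySem.List.pyGetD current_T ij.1 (0, 0)   -- index always in range
      let base := PySem.List.pyGetD st j 0 * delta - lo  -- index always in range
      (p.1 + base, p.2 + base)
    let S : List (Int × Int) := (PySem.List.pyRange 0 (4 * n) 1).map elem
    S ++ [((starts.1 - 1) * delta, (starts.2.1 - 1) * delta),
          ((starts.2.2.1 + 2) * delta, (starts.2.2.2 + 2) * delta),
          ((starts.1 + 2) * delta, (starts.2.2.1 - 1) * delta),
          ((starts.2.1 + 2) * delta, (starts.2.2.2 - 1) * delta)]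
  | _, _ => []   -- Python raises ValueError here (empty current_T); excluded by Pre_

-- ===== PRECONDITION & SPEC =====
-- Pre_ excludes only the empty current_T, on which Python A raises ValueError (min of empty sequence).
def Pre_apply_round_py (current_T : List (Int × Int)) (starts : Int × Int × Int × Int) (do_interleave : Bool) (reverse_order : Bool) : Prop := current_T ≠ []
instance (current_T : List (Int × Int)) (starts : Int × Int × Int × Int) (do_interleave : Bool) (reverse_order : Bool) : Decidable (Pre_apply_round_py current_T starts do_interleave reverse_order) := by unfold Pre_apply_round_py; infer_instance

def pvWitness_apply_round_py : (List (Int × Int)) × (Int × Int × Int × Int) × Bool × Bool := ([(0, 2), (3, 5)], (0, 1, 2, 3), true, false)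

def Spec_apply_round_py (current_T : List (Int × Int)) (starts : Int × Int × Int × Int) (do_interleave : Bool) (reverse_order : Bool) (out : List (Int × Int)) : Prop := out = apply_round_py_alt current_T starts do_interleave reverse_order
instance (current_T : List (Int × Int)) (starts : Int × Int × Int × Int) (do_interleave : Bool) (reverse_order : Bool) (out : List (Int × Int)) : Decidable (Spec_apply_round_py current_T starts do_interleave reverse_order out) := by unfold Spec_apply_round_py; infer_instance

-- ===== CLAIM (what is proved, stated in full; the proofs are below) =====
def Claim_equal_apply_round_py : Prop := ∀ (current_T : List (Int × Int)) (starts : Int × Int × Int × Int) (do_interleave : Bool) (reverse_order : Bool), Dom_apply_round_py current_T starts do_interleave reverse_order → Pre_apply_round_py current_T starts do_interleave reverse_order → Spec_apply_round_py current_T starts do_interleave reverse_order (apply_round_py current_T starts do_interleave reverse_order)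

-- ===== LEMMAS AND PROOFS =====

-- range(m*n) decoded by divmod equals the nested double loop
theorem pvMapRangeDivmod {α : Type} (m n : Nat) (f : Nat → Nat → α) :
    (List.range (m * n)).map (fun k => f (k / n) (k % n))
      = (List.range m).flatMap (fun j => (List.range n).map (fun i => f j i)) := by
  induction m with
  | zero => simp
  | succ m ih =>
    rcases Nat.eq_zero_or_pos n with hn | hn
    · subst hn; simp
    · rw [Nat.succ_mul, List.range_add, List.map_append, ih, List.range_succ,
        List.flatMap_append]
      congr 1
      simp only [List.flatMap_cons, List.flatMap_nil, List.append_nil, List.map_map,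
        List.map_inj_left, Function.comp]
      intro i hi
      rw [List.mem_range] at hi
      have hdiv : (m * n + i) / n = m := by
        rw [Nat.add_comm, Nat.add_mul_div_right _ _ hn, Nat.div_eq_of_lt hi, Nat.zero_add]
      have hmod : (m * n + i) % n = i := by
        rw [Nat.add_comm, Nat.add_mul_mod_self_right, Nat.mod_eq_of_lt hi]
      simp [hdiv, hmod]

-- mapping a function of xs[i] over range(len xs) is mapping over xs
theorem pvMapRangeGetD {α β : Type} [Inhabited α] (xs : List α) (d : α) (g : α → β) :
    (List.range xs.length).map (fun i => g (xs.getD i d)) = xs.map g := by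
  apply List.ext_getElem
  · simp
  · intro i h1 h2
    simp at h1 h2 ⊢
    rw [List.getElem?_eq_getElem h2]
    rfl

theorem pvFlatMapRangeGetD {α β : Type} [Inhabited α] (xs : List α) (d : α) (g : α → List β) :
    (List.range xs.length).flatMap (fun i => g (xs.getD i d)) = xs.flatMap g := by
  rw [List.flatMap_def, List.flatMap_def, pvMapRangeGetD xs d g]

-- element of block j at interval i (st = start list, possibly reversed)
def pvShiftJI (st : List Int) (T : List (Int × Int)) (delta lo : Int) (j i : Nat) : Int × Int :=
  let s := st.getD j 0
  let q := T.getD i ((0 : Int), (0 : Int))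
  (q.1 + (s * delta - lo), q.2 + (s * delta - lo))

def pvShiftIJ (st : List Int) (T : List (Int × Int)) (delta lo : Int) (i j : Nat) : Int × Int :=
  pvShiftJI st T delta lo j i

theorem pvMapRangeShift (T : List (Int × Int)) (c : Int) :
    (List.range T.length).map
      (fun i => ((T.getD i ((0 : Int), (0 : Int))).1 + c, (T.getD i ((0 : Int), (0 : Int))).2 + c))
      = T.map (fun q => (q.1 + c, q.2 + c)) :=
  pvMapRangeGetD T ((0 : Int), (0 : Int)) (fun q => (q.1 + c, q.2 + c))

theorem pvFoldlQuadShift (T : List (Int × Int)) (c0 c1 c2 c3 : Int) :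
    T.foldl (fun S q => (((S ++ [(q.1 + c0, q.2 + c0)]) ++ [(q.1 + c1, q.2 + c1)])
        ++ [(q.1 + c2, q.2 + c2)]) ++ [(q.1 + c3, q.2 + c3)]) ([] : List (Int × Int))
    = T.flatMap (fun q =>
      [(q.1 + c0, q.2 + c0), (q.1 + c1, q.2 + c1), (q.1 + c2, q.2 + c2), (q.1 + c3, q.2 + c3)]) := by
  have h : (fun (S : List (Int × Int)) (q : Int × Int) =>
      (((S ++ [(q.1 + c0, q.2 + c0)]) ++ [(q.1 + c1, q.2 + c1)])
        ++ [(q.1 + c2, q.2 + c2)]) ++ [(q.1 + c3, q.2 + c3)])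
      = fun S q => S ++ [(q.1 + c0, q.2 + c0), (q.1 + c1, q.2 + c1),
          (q.1 + c2, q.2 + c2), (q.1 + c3, q.2 + c3)] := by
    funext S q; simp
  rw [h, PySem.List.foldl_append_eq_flatMap]
  simp

-- ===== VERDICT (by name: the statement is the Claim_ definition above) =====
set_option maxHeartbeats 4000000 in
theorem apply_round_py_spec : Claim_equal_apply_round_py := by
  intro T starts di ro _ hpre
  unfold Spec_apply_round_py
  obtain ⟨p, rest, rfl⟩ : ∃ p rest, T = p :: rest := by
    cases T with
    | nil => exact absurd rfl hpre
    | cons a as => exact ⟨a, as, rfl⟩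
  have hmin : PySem.List.min? ((p :: rest).map (fun q => q.1)) (fun x => x)
      = some (List.foldl min p.1 (rest.map (fun q => q.1))) := by
    simp [PySem.List.min?_id_cons]
  have hmax : PySem.List.max? ((p :: rest).map (fun q => q.2)) (fun x => x)
      = some (List.foldl max p.2 (rest.map (fun q => q.2))) := by
    simp [PySem.List.max?_id_cons]
  simp only [apply_round_py, apply_round_py_alt, pvSpanDelta, hmin, hmax]
  set lo := List.foldl min p.1 (rest.map fun q => q.1) with hlo
  set hi := List.foldl max p.2 (rest.map fun q => q.2) with hhi
  clear_value lo hi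
  set delta := if hi - lo ≤ 0 then 1 else hi - lo with hdelta
  clear_value delta
  have hTne : (p :: rest : List (Int × Int)).length ≠ 0 := by simp
  generalize (p :: rest : List (Int × Int)) = T at hTne
  clear hmin hmax hlo hhi hdelta hpre
  obtain ⟨s0, s1, s2, s3⟩ := starts
  simp only [List.foldl_cons, List.foldl_nil, List.nil_append, List.cons_append]
  -- abbreviations
  have hlen : PySem.List.len T = (T.length : Int) := by simp [PySem.List.len_eq]
  have h4n : (4 : Int) * (T.length : Int) = ((4 * T.length : Nat) : Int) := by push_cast; ring
  -- the B-side flat map, decoded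
  rcases di with _ | _ <;> rcases ro with _ | _ <;>
    simp only [Bool.false_eq_true, if_false, if_true, List.reverse_cons, List.reverse_nil,
      List.nil_append, List.cons_append]
  · -- di = false, ro = false
    rw [hlen, h4n, PySem.List.pyRange_zero_natCast, List.map_map]
    have hn0 : (0 : Int) < (T.length : Int) := by
      have := Nat.pos_of_ne_zero hTne; exact_mod_cast this
    have hB : ∀ k ∈ List.range (4 * T.length),
        ((fun k : Int =>
          (((PySem.List.pyGetD T
              (match PySem.Int.divmod? k (T.length : Int) with
                | some (j, i) => (i, j)
                | none => (0, 0)).1 ((0 : Int), (0 : Int))).1 +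
            (PySem.List.pyGetD [s0, s1, s2, s3]
              (match PySem.Int.divmod? k (T.length : Int) with
                | some (j, i) => (i, j)
                | none => (0, 0)).2 0 * delta - lo)),
           ((PySem.List.pyGetD T
              (match PySem.Int.divmod? k (T.length : Int) with
                | some (j, i) => (i, j)
                | none => (0, 0)).1 ((0 : Int), (0 : Int))).2 +
            (PySem.List.pyGetD [s0, s1, s2, s3]
              (match PySem.Int.divmod? k (T.length : Int) with
                | some (j, i) => (i, j)
                | none => (0, 0)).2 0 * delta - lo)))) ∘ (fun k : Nat => (k : Int))) k
        = pvShiftJI [s0, s1, s2, s3] T delta lo (k / T.length) (k % T.length) := by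
      intro k hk
      rw [List.mem_range] at hk
      have hne : ((T.length : Nat) : Int) ≠ 0 := by omega
      have hdm : PySem.Int.divmod? ((k : Nat) : Int) ((T.length : Nat) : Int)
          = some (((k / T.length : Nat) : Int), ((k % T.length : Nat) : Int)) := by
        simp [PySem.Int.divmod?]
        refine ⟨fun h => hTne (by simp [h]), by simp [Int.fdiv_eq_ediv], by simp [Int.fmod_eq_emod]⟩
      simp only [Function.comp]
      rw [hdm]
      simp only [pvShiftJI, List.getD_eq_getElem?_getD, PySem.List.pyGetD_natCast]
    rw [List.map_congr_left hB,
      pvMapRangeDivmod 4 T.length (pvShiftJI [s0, s1, s2, s3] T delta lo)]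
    have e0 := pvMapRangeShift T (s0 * delta - lo)
    have e1 := pvMapRangeShift T (s1 * delta - lo)
    have e2 := pvMapRangeShift T (s2 * delta - lo)
    have e3 := pvMapRangeShift T (s3 * delta - lo)
    simp only [List.getD_eq_getElem?_getD] at e0 e1 e2 e3
    simp [pvAppendConnectors, pvShiftJI, List.range_succ, List.flatMap_cons, e0, e1, e2, e3,
      List.append_assoc]
  · -- di = false, ro = true
    rw [hlen, h4n, PySem.List.pyRange_zero_natCast, List.map_map]
    have hn0 : (0 : Int) < (T.length : Int) := by
      have := Nat.pos_of_ne_zero hTne; exact_mod_cast this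
    have hB : ∀ k ∈ List.range (4 * T.length),
        ((fun k : Int =>
          (((PySem.List.pyGetD T
              (match PySem.Int.divmod? k (T.length : Int) with
                | some (j, i) => (i, j)
                | none => (0, 0)).1 ((0 : Int), (0 : Int))).1 +
            (PySem.List.pyGetD [s0, s1, s2, s3]
              (3 - (match PySem.Int.divmod? k (T.length : Int) with
                | some (j, i) => (i, j)
                | none => (0, 0)).2) 0 * delta - lo)),
           ((PySem.List.pyGetD T
              (match PySem.Int.divmod? k (T.length : Int) with
                | some (j, i) => (i, j)
                | none => (0, 0)).1 ((0 : Int), (0 : Int))).2 +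
            (PySem.List.pyGetD [s0, s1, s2, s3]
              (3 - (match PySem.Int.divmod? k (T.length : Int) with
                | some (j, i) => (i, j)
                | none => (0, 0)).2) 0 * delta - lo)))) ∘ (fun k : Nat => (k : Int))) k
        = pvShiftJI [s3, s2, s1, s0] T delta lo (k / T.length) (k % T.length) := by
      intro k hk
      rw [List.mem_range] at hk
      have hne : ((T.length : Nat) : Int) ≠ 0 := by omega
      have hdm : PySem.Int.divmod? ((k : Nat) : Int) ((T.length : Nat) : Int)
          = some (((k / T.length : Nat) : Int), ((k % T.length : Nat) : Int)) := by
        simp [PySem.Int.divmod?]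
        refine ⟨fun h => hTne (by simp [h]), by simp [Int.fdiv_eq_ediv], by simp [Int.fmod_eq_emod]⟩
      simp only [Function.comp]
      rw [hdm]
      have hj : k / T.length < 4 :=
        (Nat.div_lt_iff_lt_mul (Nat.pos_of_ne_zero hTne)).2 hk
      have hst : PySem.List.pyGetD [s0, s1, s2, s3] (3 - ((k / T.length : Nat) : Int)) 0
          = [s3, s2, s1, s0].getD (k / T.length) 0 := by
        obtain ⟨j, hjeq⟩ : ∃ j, k / T.length = j := ⟨_, rfl⟩
        rw [hjeq] at hj ⊢
        have hc : j = 0 ∨ j = 1 ∨ j = 2 ∨ j = 3 := by omega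
        rcases hc with h | h | h | h <;> rw [h] <;> norm_num <;>
          simp [PySem.List.pyGetD, PySem.List.pyGet?, PySem.List.pyIdx?]
      rw [hst]
      simp only [pvShiftJI, List.getD_eq_getElem?_getD, PySem.List.pyGetD_natCast]
    rw [List.map_congr_left hB,
      pvMapRangeDivmod 4 T.length (pvShiftJI [s3, s2, s1, s0] T delta lo)]
    have e0 := pvMapRangeShift T (s0 * delta - lo)
    have e1 := pvMapRangeShift T (s1 * delta - lo)
    have e2 := pvMapRangeShift T (s2 * delta - lo)
    have e3 := pvMapRangeShift T (s3 * delta - lo)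
    simp only [List.getD_eq_getElem?_getD] at e0 e1 e2 e3
    simp [pvAppendConnectors, pvShiftJI, List.range_succ, List.flatMap_cons, e0, e1, e2, e3,
      List.append_assoc]
  · -- di = true, ro = false
    simp only [List.map_cons, List.map_nil, PySem.List.len_eq, List.length_map,
      PySem.List.max?_id_cons, List.foldl_cons, List.foldl_nil, max_self]
    rw [show (4 : Int) * ((T.length : Nat) : Int) = ((4 * T.length : Nat) : Int) from h4n,
      show PySem.List.pyRange 0 ((4 * T.length : Nat) : Int) 1
          = List.map (fun k : Nat => (k : Int)) (List.range (4 * T.length)) from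
        PySem.List.pyRange_zero_natCast _,
      List.map_map, show 4 * T.length = T.length * 4 from Nat.mul_comm 4 T.length]
    have hB : ∀ k ∈ List.range (T.length * 4),
        ((fun k : Int =>
          (((PySem.List.pyGetD T
              (match PySem.Int.divmod? k 4 with
                | some (i, j) => (i, j)
                | none => (0, 0)).1 ((0 : Int), (0 : Int))).1 +
            (PySem.List.pyGetD [s0, s1, s2, s3]
              (match PySem.Int.divmod? k 4 with
                | some (i, j) => (i, j)
                | none => (0, 0)).2 0 * delta - lo)),
           ((PySem.List.pyGetD T
              (match PySem.Int.divmod? k 4 with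
                | some (i, j) => (i, j)
                | none => (0, 0)).1 ((0 : Int), (0 : Int))).2 +
            (PySem.List.pyGetD [s0, s1, s2, s3]
              (match PySem.Int.divmod? k 4 with
                | some (i, j) => (i, j)
                | none => (0, 0)).2 0 * delta - lo)))) ∘ (fun k : Nat => (k : Int))) k
        = pvShiftIJ [s0, s1, s2, s3] T delta lo (k / 4) (k % 4) := by
      intro k hk
      rw [List.mem_range] at hk
      have hdm : PySem.Int.divmod? ((k : Nat) : Int) (4 : Int)
          = some (((k / 4 : Nat) : Int), ((k % 4 : Nat) : Int)) := by
        simp only [PySem.Int.divmod?, Int.fdiv_eq_ediv, Int.fmod_eq_emod]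
        norm_num
      simp only [Function.comp]
      rw [hdm]
      simp only [pvShiftIJ, pvShiftJI, List.getD_eq_getElem?_getD, PySem.List.pyGetD_natCast]
    rw [List.map_congr_left hB,
      pvMapRangeDivmod T.length 4 (pvShiftIJ [s0, s1, s2, s3] T delta lo)]
    have hqs : (List.range T.length).flatMap
        (fun j => (List.range 4).map (fun i => pvShiftIJ [s0, s1, s2, s3] T delta lo j i))
        = T.flatMap (fun q => [(q.1 + (s0 * delta - lo), q.2 + (s0 * delta - lo)), (q.1 + (s1 * delta - lo), q.2 + (s1 * delta - lo)), (q.1 + (s2 * delta - lo), q.2 + (s2 * delta - lo)), (q.1 + (s3 * delta - lo), q.2 + (s3 * delta - lo))]) :=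
      pvFlatMapRangeGetD T ((0 : Int), (0 : Int)) (fun q => [(q.1 + (s0 * delta - lo), q.2 + (s0 * delta - lo)), (q.1 + (s1 * delta - lo), q.2 + (s1 * delta - lo)), (q.1 + (s2 * delta - lo), q.2 + (s2 * delta - lo)), (q.1 + (s3 * delta - lo), q.2 + (s3 * delta - lo))])
    rw [hqs, ← pvFoldlQuadShift T (s0 * delta - lo) (s1 * delta - lo) (s2 * delta - lo) (s3 * delta - lo),
      ← PySem.List.foldl_pyRange_zero_pyGetD' T p
        (fun S q => (((S ++ [(q.1 + (s0 * delta - lo), q.2 + (s0 * delta - lo))]) ++ [(q.1 + (s1 * delta - lo), q.2 + (s1 * delta - lo))]) ++ [(q.1 + (s2 * delta - lo), q.2 + (s2 * delta - lo))]) ++ [(q.1 + (s3 * delta - lo), q.2 + (s3 * delta - lo))]) []]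
    simp only [pvAppendConnectors, List.append_assoc, List.cons_append, List.nil_append]
    congr 1
    apply PySem.List.foldl_congr_mem
    intro S i hmem
    rw [PySem.List.mem_pyRange_one] at hmem
    obtain ⟨h0, h1⟩ := hmem
    simp [pysem, List.length_map, PySem.List.pyGetD_eq_getElem, h0, h1, List.getElem_map]
  · -- di = true, ro = true
    simp only [List.map_cons, List.map_nil, PySem.List.len_eq, List.length_map,
      PySem.List.max?_id_cons, List.foldl_cons, List.foldl_nil, max_self]
    rw [show (4 : Int) * ((T.length : Nat) : Int) = ((4 * T.length : Nat) : Int) from h4n,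
      show PySem.List.pyRange 0 ((4 * T.length : Nat) : Int) 1
          = List.map (fun k : Nat => (k : Int)) (List.range (4 * T.length)) from
        PySem.List.pyRange_zero_natCast _,
      List.map_map, show 4 * T.length = T.length * 4 from Nat.mul_comm 4 T.length]
    have hB : ∀ k ∈ List.range (T.length * 4),
        ((fun k : Int =>
          (((PySem.List.pyGetD T
              (match PySem.Int.divmod? k 4 with
                | some (i, j) => (i, j)
                | none => (0, 0)).1 ((0 : Int), (0 : Int))).1 +
            (PySem.List.pyGetD [s0, s1, s2, s3]
              (3 - (match PySem.Int.divmod? k 4 with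
                | some (i, j) => (i, j)
                | none => (0, 0)).2) 0 * delta - lo)),
           ((PySem.List.pyGetD T
              (match PySem.Int.divmod? k 4 with
                | some (i, j) => (i, j)
                | none => (0, 0)).1 ((0 : Int), (0 : Int))).2 +
            (PySem.List.pyGetD [s0, s1, s2, s3]
              (3 - (match PySem.Int.divmod? k 4 with
                | some (i, j) => (i, j)
                | none => (0, 0)).2) 0 * delta - lo)))) ∘ (fun k : Nat => (k : Int))) k
        = pvShiftIJ [s3, s2, s1, s0] T delta lo (k / 4) (k % 4) := by
      intro k hk
      rw [List.mem_range] at hk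
      have hdm : PySem.Int.divmod? ((k : Nat) : Int) (4 : Int)
          = some (((k / 4 : Nat) : Int), ((k % 4 : Nat) : Int)) := by
        simp only [PySem.Int.divmod?, Int.fdiv_eq_ediv, Int.fmod_eq_emod]
        norm_num
      simp only [Function.comp]
      rw [hdm]
      have hst : PySem.List.pyGetD [s0, s1, s2, s3] (3 - ((k % 4 : Nat) : Int)) 0
          = [s3, s2, s1, s0].getD (k % 4) 0 := by
        have hc : k % 4 = 0 ∨ k % 4 = 1 ∨ k % 4 = 2 ∨ k % 4 = 3 := by omega
        rcases hc with h | h | h | h <;> rw [h] <;> norm_num <;>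
          simp [PySem.List.pyGetD, PySem.List.pyGet?, PySem.List.pyIdx?]
      rw [hst]
      simp only [pvShiftIJ, pvShiftJI, List.getD_eq_getElem?_getD, PySem.List.pyGetD_natCast]
    rw [List.map_congr_left hB,
      pvMapRangeDivmod T.length 4 (pvShiftIJ [s3, s2, s1, s0] T delta lo)]
    have hqs : (List.range T.length).flatMap
        (fun j => (List.range 4).map (fun i => pvShiftIJ [s3, s2, s1, s0] T delta lo j i))
        = T.flatMap (fun q => [(q.1 + (s3 * delta - lo), q.2 + (s3 * delta - lo)), (q.1 + (s2 * delta - lo), q.2 + (s2 * delta - lo)), (q.1 + (s1 * delta - lo), q.2 + (s1 * delta - lo)), (q.1 + (s0 * delta - lo), q.2 + (s0 * delta - lo))]) :=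
      pvFlatMapRangeGetD T ((0 : Int), (0 : Int)) (fun q => [(q.1 + (s3 * delta - lo), q.2 + (s3 * delta - lo)), (q.1 + (s2 * delta - lo), q.2 + (s2 * delta - lo)), (q.1 + (s1 * delta - lo), q.2 + (s1 * delta - lo)), (q.1 + (s0 * delta - lo), q.2 + (s0 * delta - lo))])
    rw [hqs, ← pvFoldlQuadShift T (s3 * delta - lo) (s2 * delta - lo) (s1 * delta - lo) (s0 * delta - lo),
      ← PySem.List.foldl_pyRange_zero_pyGetD' T p
        (fun S q => (((S ++ [(q.1 + (s3 * delta - lo), q.2 + (s3 * delta - lo))]) ++ [(q.1 + (s2 * delta - lo), q.2 + (s2 * delta - lo))]) ++ [(q.1 + (s1 * delta - lo), q.2 + (s1 * delta - lo))]) ++ [(q.1 + (s0 * delta - lo), q.2 + (s0 * delta - lo))]) []]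
    simp only [pvAppendConnectors, List.append_assoc, List.cons_append, List.nil_append]
    congr 1
    apply PySem.List.foldl_congr_mem
    intro S i hmem
    rw [PySem.List.mem_pyRange_one] at hmem
    obtain ⟨h0, h1⟩ := hmem
    simp [pysem, List.length_map, PySem.List.pyGetD_eq_getElem, h0, h1, List.getElem_map]
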